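-- pv_equiv track=rewrite | github.com/mgmgperson/pokemon-manager | database/migrators/nicknames.py | capitalize_after_non_alphabetic
-- ===== SOURCE A (Python) =====
-- def capitalize_after_non_alphabetic(name: str) -> str:
--     result = []
--     capitalize_next = True
--
--     for char in name:
--         if not char.isalpha():  # Check if the character is non-alphabetic
--             result.append(char)
--             capitalize_next = True  # Capitalize the next alphabetic character
--         elif capitalize_next:
--             result.append(char.upper())
--             capitalize_next = False
--         else:
--             result.append(char.lower())  # Ensure everything else is lowercase
--
--     # Join the result list back into a string
--     return ''.join(result)
-- ===== SOURCE B (Python) =====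
-- def capitalize_after_non_alphabetic(name: str) -> str:
--     pieces = []
--     i = 0
--     n = len(name)
--     while i < n:
--         alpha = name[i].isalpha()
--         j = i + 1
--         while j < n and name[j].isalpha() == alpha:
--             j += 1
--         run = name[i:j]
--         pieces.append(run[0].upper() + run[1:].lower() if alpha else run)
--         i = j
--     return ''.join(pieces)
-- ===== Notes on version B (the rewrite author's own statement) =====
-- stated objective: alternative
-- what changed: Replaces the per-character capitalize_next flag machine with a run-based two-pointer scan: the string is split into maximal alphabetic/non-alphabetic runs, alphabetic runs become run[0].upper()+run[1:].lower(), other runs pass through, then all pieces are joined.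
import Mathlib
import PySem

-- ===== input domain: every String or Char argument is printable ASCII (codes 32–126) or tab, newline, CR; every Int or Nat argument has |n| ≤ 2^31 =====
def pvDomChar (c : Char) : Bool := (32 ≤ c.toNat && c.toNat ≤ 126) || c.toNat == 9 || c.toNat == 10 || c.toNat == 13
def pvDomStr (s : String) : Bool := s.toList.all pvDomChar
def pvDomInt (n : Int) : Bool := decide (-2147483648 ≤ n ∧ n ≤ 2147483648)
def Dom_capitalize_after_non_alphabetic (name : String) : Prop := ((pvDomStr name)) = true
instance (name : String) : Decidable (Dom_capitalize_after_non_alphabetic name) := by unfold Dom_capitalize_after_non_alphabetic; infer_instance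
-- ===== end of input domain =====

-- B replaces A's per-character capitalize_next flag machine with a run-based scan
-- (maximal alpha / non-alpha runs, each mapped and joined); alternative decomposition, same cost.

-- ===== PORT A =====
-- the loop body: (result, capitalize_next) state, one character
def pvStepA (st : List Char × Bool) (c : Char) : List Char × Bool :=
  if !(PySem.Chars.isalpha c) then (st.1 ++ [c], true)
  else if st.2 then (st.1 ++ [PySem.Chars.upperChar c], false)
  else (st.1 ++ [PySem.Chars.lowerChar c], false)

def capitalize_after_non_alphabetic (name : String) : String :=
  String.ofList (name.toList.foldl pvStepA ([], true)).1

-- ===== PORT B =====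
-- maximal runs of equal isalpha-status (B's outer while loop with the two pointers i, j)
def pvRuns (l : List Char) : List (List Char) :=
  match l with
  | [] => []
  | c :: rest =>
    let p := fun x => PySem.Chars.isalpha x == PySem.Chars.isalpha c
    (c :: rest.takeWhile p) :: pvRuns (rest.dropWhile p)
termination_by l.length
decreasing_by
  simp only [List.length_cons]
  exact Nat.lt_succ_of_le (List.length_dropWhile_le _ _)

-- one piece: run[0].upper() + run[1:].lower() if alpha else run
def pvPiece (run : List Char) : List Char :=
  match run with
  | [] => []
  | c :: rest =>
    if PySem.Chars.isalpha c then PySem.Chars.upperChar c :: PySem.Chars.lower rest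
    else c :: rest

def capitalize_after_non_alphabetic_alt (name : String) : String :=
  String.ofList ((pvRuns name.toList).flatMap pvPiece)

-- ===== PRECONDITION & SPEC =====
def Spec_capitalize_after_non_alphabetic (name : String) (out : String) : Prop := out = capitalize_after_non_alphabetic_alt name
instance (name : String) (out : String) : Decidable (Spec_capitalize_after_non_alphabetic name out) := by unfold Spec_capitalize_after_non_alphabetic; infer_instance

-- ===== CLAIM (what is proved, stated in full; the proofs are below) =====
def Claim_equal_capitalize_after_non_alphabetic : Prop := ∀ (name : String), Dom_capitalize_after_non_alphabetic name → Spec_capitalize_after_non_alphabetic name (capitalize_after_non_alphabetic name)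

-- ===== LEMMAS AND PROOFS =====

-- A's output as a direct recursion on the character list with the flag
def pvAout (cap : Bool) : List Char → List Char
  | [] => []
  | c :: rest =>
    if !(PySem.Chars.isalpha c) then c :: pvAout true rest
    else if cap then PySem.Chars.upperChar c :: pvAout false rest
    else PySem.Chars.lowerChar c :: pvAout false rest

theorem pvFoldl_eq_aout (l : List Char) (acc : List Char) (cap : Bool) :
    (l.foldl pvStepA (acc, cap)).1 = acc ++ pvAout cap l := by
  induction l generalizing acc cap with
  | nil => simp [pvAout]
  | cons c rest ih =>
    rw [List.foldl_cons]
    by_cases h : PySem.Chars.isalpha c = true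
    · cases cap with
      | false =>
        rw [show pvStepA (acc, false) c = (acc ++ [PySem.Chars.lowerChar c], false) from by
          simp [pvStepA, h], ih]
        simp [pvAout, h]
      | true =>
        rw [show pvStepA (acc, true) c = (acc ++ [PySem.Chars.upperChar c], false) from by
          simp [pvStepA, h], ih]
        simp [pvAout, h]
    · simp at h
      rw [show pvStepA (acc, cap) c = (acc ++ [c], true) from by
        simp [pvStepA, h], ih]
      simp [pvAout, h]

theorem pvAout_false (l : List Char) :
    pvAout false l = PySem.Chars.lower (l.takeWhile PySem.Chars.isalpha)
      ++ pvAout true (l.dropWhile PySem.Chars.isalpha) := by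
  induction l with
  | nil => simp [pvAout, PySem.Chars.lower]
  | cons c rest ih =>
    by_cases h : PySem.Chars.isalpha c = true
    · simp [pvAout, h, PySem.Chars.lower, ih]
    · simp at h; simp [pvAout, h, PySem.Chars.lower]

theorem pvAout_true_nonalpha (l : List Char) :
    pvAout true l = l.takeWhile (fun x => !PySem.Chars.isalpha x)
      ++ pvAout true (l.dropWhile (fun x => !PySem.Chars.isalpha x)) := by
  induction l with
  | nil => simp [pvAout]
  | cons c rest ih =>
    by_cases h : PySem.Chars.isalpha c = true
    · simp [pvAout, h]
    · simp at h; simp [pvAout, h, ih]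

theorem pvAout_eq_runs (l : List Char) :
    pvAout true l = (pvRuns l).flatMap pvPiece := by
  induction l using pvRuns.induct with
  | case1 => simp [pvAout, pvRuns]
  | case2 c rest p ih =>
    rw [pvRuns]
    simp only [List.flatMap_cons]
    by_cases h : PySem.Chars.isalpha c = true
    · have hp : (fun x => PySem.Chars.isalpha x == PySem.Chars.isalpha c)
          = PySem.Chars.isalpha := by funext x; simp [h]
      rw [show p = (fun x => PySem.Chars.isalpha x == PySem.Chars.isalpha c) from rfl] at ih
      rw [hp] at ih ⊢
      simp [pvAout, pvPiece, h, pvAout_false rest, ih]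
    · simp at h
      have hp : (fun x => PySem.Chars.isalpha x == PySem.Chars.isalpha c)
          = (fun x => !PySem.Chars.isalpha x) := by funext x; simp [h]
      rw [show p = (fun x => PySem.Chars.isalpha x == PySem.Chars.isalpha c) from rfl] at ih
      rw [hp] at ih ⊢
      simp [pvAout, pvPiece, h, pvAout_true_nonalpha rest, ih]

-- ===== VERDICT (by name: the statement is the Claim_ definition above) =====
theorem capitalize_after_non_alphabetic_spec : Claim_equal_capitalize_after_non_alphabetic := by
  intro name _
  unfold Spec_capitalize_after_non_alphabetic capitalize_after_non_alphabetic capitalize_after_non_alphabetic_alt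
  rw [pvFoldl_eq_aout, List.nil_append, pvAout_eq_runs]
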